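-- pv_equiv track=rewrite | github.com/serdardoruk/Amazon-Online-Assessment-Python-Solutions | Questions/LongestStringMadeUpOfOnlyVowels.py | formLongestStringWithVowelAfterNRemoval
-- ===== SOURCE A (Python) =====
-- def formLongestStringWithVowelAfterNRemoval(input_string, number_of_substring_can_be_removed):
-- 	start, end = 0, len(input_string) - 1
-- 	vowels = "aeiou"
--
-- 	while (start < len(input_string)):
-- 		if input_string[start] in vowels:
-- 			start += 1
-- 		else:
-- 			break
--
-- 	# Entire string is with vowels. So, return the entire string length
-- 	if start == len(input_string):
-- 		return start
--
-- 	"""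
-- 	We don't need to check less then starting points. We've established in above that, start is the first consonant index.
-- 	So, no need to further check in the same index.
-- 	"""
-- 	while (end > start):
-- 		if input_string[end] in vowels:
-- 			end -= 1
-- 		else:
-- 			break
--
-- 	res = start + (len(input_string) - 1 - end)
--
-- 	vowels_count_in_middle = []
-- 	count = 0
-- 	while (start < end):
-- 		if input_string[start] in vowels:
-- 			count += 1
-- 		else:
-- 			if count > 0:
-- 				vowels_count_in_middle.append(count)
-- 			count = 0
-- 		start += 1
--
-- 	"""
-- 	We need to find the max (number_of_substring_can_be_removed - 1) items from the vowel count to list.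
-- 	Why number_of_substring_can_be_removed-1?
-- 	Let's say, we are allowed to remove 2 substrings.
-- 	It means we can actually take at most 1 consecutive vowel substring from the original string.
-- 	If 3 removal is allowed, we can take 2 vowels substring from the middle.
-- 	"""
-- 	return res + sum(sorted(vowels_count_in_middle, reverse=True)[:(number_of_substring_can_be_removed - 1)])
-- ===== SOURCE B (Python) =====
-- def formLongestStringWithVowelAfterNRemoval(input_string, number_of_substring_can_be_removed):
--     vowels = "aeiou"
--     n = len(input_string)
--     # one pass: segment lengths between consonants (prefix, gaps..., suffix)
--     segs = []
--     cur = 0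
--     for ch in input_string:
--         if ch in vowels:
--             cur += 1
--         else:
--             segs.append(cur)
--             cur = 0
--     segs.append(cur)
--     if len(segs) == 1:          # no consonant at all
--         return n
--     res = segs[0] + segs[-1]
--     mid = [x for x in segs[1:-1] if x > 0]   # all interior vowel runs
--     # top (k-1) selection by a length histogram instead of a comparison sort
--     cnt = {}
--     for x in mid:
--         cnt[x] = cnt.get(x, 0) + 1
--     rem = number_of_substring_can_be_removed - 1
--     total = 0
--     for L in range(n, 0, -1):
--         c = cnt.get(L, 0)
--         if c > rem:
--             c = rem
--         total += c * L
--         rem -= c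
--     return res + total
-- ===== Notes on version B (the rewrite author's own statement) =====
-- stated objective: alternative
-- what changed: B replaces A's three index-walking while-loops by a single pass that splits the string into consonant-delimited segment lengths, and replaces A's comparison sort + slice + sum by a top-(k-1) selection over a run-length histogram (counting-sort style descending sweep); B also counts the interior vowel run adjacent to the last consonant, which A's flush-on-consonant loop drops.
-- intended difference: When at least 2 removals are allowed and the vowel run immediately before the last consonant is longer than the (k-1)-th largest of the other interior runs, A silently drops that run (its middle loop only flushes a run when it hits a consonant strictly before the last one) and returns a too-small length, while B counts it; B's value is the intended longest vowel string. — e.g. on formLongestStringWithVowelAfterNRemoval("bab", 2): A returns 0, B returns 1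
-- outside the precondition, e.g. on formLongestStringWithVowelAfterNRemoval('bobobb', 0): A returns 1, B returns -6; on formLongestStringWithVowelAfterNRemoval('ab', -1): A returns 1, B returns -3
import Mathlib
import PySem

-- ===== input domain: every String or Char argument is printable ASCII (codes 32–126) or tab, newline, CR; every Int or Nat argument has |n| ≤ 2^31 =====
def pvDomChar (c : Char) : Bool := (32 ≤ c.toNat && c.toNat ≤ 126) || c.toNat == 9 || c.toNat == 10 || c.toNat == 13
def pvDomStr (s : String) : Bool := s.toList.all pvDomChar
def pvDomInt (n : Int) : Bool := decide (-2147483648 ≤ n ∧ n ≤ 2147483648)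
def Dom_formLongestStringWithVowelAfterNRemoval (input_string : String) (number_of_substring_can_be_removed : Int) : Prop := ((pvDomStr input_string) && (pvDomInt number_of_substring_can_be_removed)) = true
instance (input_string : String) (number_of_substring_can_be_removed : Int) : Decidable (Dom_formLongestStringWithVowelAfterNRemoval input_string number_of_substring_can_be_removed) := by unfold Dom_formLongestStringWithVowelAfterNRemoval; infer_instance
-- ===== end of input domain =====

-- B makes ONE pass collecting consonant-delimited segment lengths (instead of A's three
-- index-walking while-loops) and selects the top (k-1) interior runs by a length HISTOGRAM
-- swept from the largest length down (instead of A's comparison sort + slice + sum); B also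
-- counts the interior vowel run adjacent to the last consonant, which A's flush-on-consonant
-- loop drops (stated as the intended difference D_ below).

-- ===== PORT A =====
def pvAVowel (c : Char) : Bool := c == 'a' || c == 'e' || c == 'i' || c == 'o' || c == 'u'

-- while start < len(s): if s[start] vowel then start += 1 else break  (start = count of consumed chars)
def pvAStart : List Char → Nat → Nat
  | [], s => s
  | c :: rest, s => if pvAVowel c then pvAStart rest (s + 1) else s

-- while end > start: if s[end] vowel then end -= 1 else break  (walked over the reversed list, in sync with e)
def pvAEnd : List Char → Nat → Nat → Nat
  | [], _, e => e
  | c :: rest, start, e =>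
    if start < e then (if pvAVowel c then pvAEnd rest start (e - 1) else e) else e

-- while start < end: count vowels, flush count into the list at each consonant
def pvAMid : List Char → Int → List Int → List Int
  | [], _, acc => acc
  | c :: rest, count, acc =>
    if pvAVowel c then pvAMid rest (count + 1) acc
    else pvAMid rest 0 (if 0 < count then acc ++ [count] else acc)

def formLongestStringWithVowelAfterNRemoval (input_string : String) (number_of_substring_can_be_removed : Int) : Int :=
  let l := input_string.toList
  let n := l.length
  let start := pvAStart l 0
  if start = n then (start : Int)
  else
    let e := pvAEnd l.reverse start (n - 1)
    let res : Int := (start : Int) + ((n : Int) - 1 - (e : Int))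
    let runs := pvAMid ((l.drop start).take (e - start)) 0 []
    res + (PySem.List.slice (PySem.List.sorted runs (fun x => x) true) none (some (number_of_substring_can_be_removed - 1))).sum

-- ===== PORT B =====
def pvBVowel (c : Char) : Bool := c == 'a' || c == 'e' || c == 'i' || c == 'o' || c == 'u'

-- one pass: for ch in s: vowel -> cur += 1; consonant -> segs.append(cur); cur = 0   (then segs.append(cur))
def pvSegs : List Char → Int → List Int
  | [], cur => [cur]
  | c :: r, cur => if pvBVowel c then pvSegs r (cur + 1) else cur :: pvSegs r 0

-- for L in range(n, 0, -1): c = cnt.get(L, 0); if c > rem: c = rem; total += c*L; rem -= c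
def pvBLoop (cnt : PySem.Dict Int Int) : Nat → Int → Int → Int
  | 0, _, total => total
  | L + 1, rem, total =>
    let c0 := cnt.getD ((L + 1 : Nat) : Int) 0
    let c := if rem < c0 then rem else c0
    pvBLoop cnt L (rem - c) (total + c * ((L + 1 : Nat) : Int))

def formLongestStringWithVowelAfterNRemoval_alt (input_string : String) (number_of_substring_can_be_removed : Int) : Int :=
  let l := input_string.toList
  let n := l.length
  let segs := pvSegs l 0
  if segs.length = 1 then (n : Int)
  else
    let res := segs.headD 0 + segs.getLastD 0
    let mid := (PySem.List.slice segs (some 1) (some (-1))).filter (fun x => decide (0 < x))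
    let cnt := mid.foldl (fun d x => d.insert x (d.getD x 0 + 1)) PySem.Dict.empty
    res + pvBLoop cnt n (number_of_substring_can_be_removed - 1) 0

-- ===== PRECONDITION & SPEC =====
-- Pre_ restricts to the task's natural domain, at least one allowed removal: for
-- number_of_substring_can_be_removed ≤ 0 A's negative slice sorted(runs)[:k-1] accidentally
-- keeps all but the |k-1| smallest middle runs, which no caller of this task can mean.
def Pre_formLongestStringWithVowelAfterNRemoval (input_string : String) (number_of_substring_can_be_removed : Int) : Prop :=
  1 ≤ number_of_substring_can_be_removed

instance (input_string : String) (number_of_substring_can_be_removed : Int) : Decidable (Pre_formLongestStringWithVowelAfterNRemoval input_string number_of_substring_can_be_removed) := by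
  unfold Pre_formLongestStringWithVowelAfterNRemoval; infer_instance

def pvWitness_formLongestStringWithVowelAfterNRemoval : String × Int := ("ab", 1)

-- segment lengths of the input split at consonants (library splitOnP; reaches neither port)
def pvDSegs (s : String) : List Int :=
  (s.toList.splitOnP (fun c => !(['a', 'e', 'i', 'o', 'u'].contains c))).map (fun t => (t.length : Int))

-- When ≥ 2 removals are allowed and the vowel run immediately before the LAST consonant is
-- longer than the (k-1)-th largest of the other interior runs, A silently drops that run and
-- returns a too-small length; B counts it, which is the intended longest vowel string.
def D_formLongestStringWithVowelAfterNRemoval (input_string : String) (number_of_substring_can_be_removed : Int) : Prop :=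
  2 ≤ number_of_substring_can_be_removed ∧
  3 ≤ (pvDSegs input_string).length ∧
  1 ≤ (pvDSegs input_string).dropLast.getLastD 0 ∧
  (((pvDSegs input_string).dropLast.dropLast.tail.countP
      (fun x => decide ((pvDSegs input_string).dropLast.getLastD 0 ≤ x)) : Int)
    < number_of_substring_can_be_removed - 1)

instance (input_string : String) (number_of_substring_can_be_removed : Int) : Decidable (D_formLongestStringWithVowelAfterNRemoval input_string number_of_substring_can_be_removed) := by
  unfold D_formLongestStringWithVowelAfterNRemoval; infer_instance

def Spec_formLongestStringWithVowelAfterNRemoval (input_string : String) (number_of_substring_can_be_removed : Int) (out : Int) : Prop :=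
  ¬ D_formLongestStringWithVowelAfterNRemoval input_string number_of_substring_can_be_removed → out = formLongestStringWithVowelAfterNRemoval_alt input_string number_of_substring_can_be_removed

instance (input_string : String) (number_of_substring_can_be_removed : Int) (out : Int) : Decidable (Spec_formLongestStringWithVowelAfterNRemoval input_string number_of_substring_can_be_removed out) := by
  unfold Spec_formLongestStringWithVowelAfterNRemoval; infer_instance

def pvDiffWitness_formLongestStringWithVowelAfterNRemoval : String × Int := ("bab", 2)
def pvDiffWitnessOut_formLongestStringWithVowelAfterNRemoval : Int × Int := (0, 1)

-- ===== CLAIM (what is proved, stated in full; the proofs are below) =====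
def Claim_unchanged_formLongestStringWithVowelAfterNRemoval : Prop := ∀ (input_string : String) (number_of_substring_can_be_removed : Int), Dom_formLongestStringWithVowelAfterNRemoval input_string number_of_substring_can_be_removed → Pre_formLongestStringWithVowelAfterNRemoval input_string number_of_substring_can_be_removed → Spec_formLongestStringWithVowelAfterNRemoval input_string number_of_substring_can_be_removed (formLongestStringWithVowelAfterNRemoval input_string number_of_substring_can_be_removed)

def Claim_changed_formLongestStringWithVowelAfterNRemoval : Prop := Dom_formLongestStringWithVowelAfterNRemoval (pvDiffWitness_formLongestStringWithVowelAfterNRemoval.1) (pvDiffWitness_formLongestStringWithVowelAfterNRemoval.2) ∧ Pre_formLongestStringWithVowelAfterNRemoval (pvDiffWitness_formLongestStringWithVowelAfterNRemoval.1) (pvDiffWitness_formLongestStringWithVowelAfterNRemoval.2) ∧ D_formLongestStringWithVowelAfterNRemoval (pvDiffWitness_formLongestStringWithVowelAfterNRemoval.1) (pvDiffWitness_formLongestStringWithVowelAfterNRemoval.2) ∧ formLongestStringWithVowelAfterNRemoval (pvDiffWitness_formLongestStringWithVowelAfterNRemoval.1) (pvDiffWitness_formLongestStringWithVowelAfterNRemoval.2)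 = pvDiffWitnessOut_formLongestStringWithVowelAfterNRemoval.1 ∧ formLongestStringWithVowelAfterNRemoval_alt (pvDiffWitness_formLongestStringWithVowelAfterNRemoval.1) (pvDiffWitness_formLongestStringWithVowelAfterNRemoval.2) = pvDiffWitnessOut_formLongestStringWithVowelAfterNRemoval.2 ∧ pvDiffWitnessOut_formLongestStringWithVowelAfterNRemoval.1 ≠ pvDiffWitnessOut_formLongestStringWithVowelAfterNRemoval.2

def Claim_exact_formLongestStringWithVowelAfterNRemoval : Prop := ∀ (input_string : String) (number_of_substring_can_be_removed : Int), Dom_formLongestStringWithVowelAfterNRemoval input_string number_of_substring_can_be_removed → Pre_formLongestStringWithVowelAfterNRemoval input_string number_of_substring_can_be_removed → D_formLongestStringWithVowelAfterNRemoval input_string number_of_substring_can_be_removed → formLongestStringWithVowelAfterNRemoval input_string number_of_substring_can_be_removed ≠ formLongestStringWithVowelAfterNRemoval_alt input_string number_of_substring_can_be_removed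

-- ===== LEMMAS AND PROOFS =====

theorem pvB_eq_pvA : pvBVowel = pvAVowel := rfl

theorem pv_not_vowel {c : Char} (h : ¬ pvAVowel c = true) : pvAVowel c = false := by
  cases hv : pvAVowel c
  · rfl
  · exact absurd hv h

-- ===== A-side loop characterizations =====
theorem pvAStart_vowels (P rest : List Char) (s : Nat) (h : ∀ c ∈ P, pvAVowel c = true) :
    pvAStart (P ++ rest) s = pvAStart rest (s + P.length) := by
  induction P generalizing s with
  | nil => simp
  | cons c P ih =>
    have hc : pvAVowel c = true := h c (by simp)
    simp only [List.cons_append, pvAStart, hc, if_pos]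
    rw [ih (s + 1) (fun x hx => h x (by simp [hx]))]
    congr 1
    simp only [List.length_cons]
    omega

theorem pvAStart_consonant (c : Char) (R : List Char) (s : Nat) (h : pvAVowel c = false) :
    pvAStart (c :: R) s = s := by
  simp [pvAStart, h]

theorem pvAEnd_spec (V : List Char) (d : Char) (rest : List Char) (s e : Nat)
    (hV : ∀ c ∈ V, pvAVowel c = true) (hd : pvAVowel d = false) (he : s + V.length ≤ e) :
    pvAEnd (V ++ d :: rest) s e = e - V.length := by
  induction V generalizing e with
  | nil =>
    simp only [List.nil_append, pvAEnd, hd, List.length_nil, Nat.sub_zero]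
    split <;> simp
  | cons c V ih =>
    have hc : pvAVowel c = true := hV c (by simp)
    have hlt : s < e := by simp at he; omega
    simp only [List.cons_append, pvAEnd, if_pos hlt, hc, if_pos]
    rw [ih (fun x hx => hV x (by simp [hx])) (e := e - 1) (by simp at he ⊢; omega)]
    simp
    omega

theorem pvAMid_acc (m : List Char) (cnt : Int) (acc : List Int) :
    pvAMid m cnt acc = acc ++ pvAMid m cnt [] := by
  induction m generalizing cnt acc with
  | nil => simp [pvAMid]
  | cons c m ih =>
    by_cases h : pvAVowel c = true
    · simp only [pvAMid, h, if_pos]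
      rw [ih (cnt + 1) acc]
    · simp only [pvAMid, h, Bool.false_eq_true, if_neg, not_false_iff, List.nil_append]
      by_cases hc : (0 : Int) < cnt
      · simp only [if_pos hc]
        rw [ih 0 (acc ++ [cnt]), ih 0 [cnt], List.append_assoc]
      · simp only [if_neg hc]
        exact ih 0 acc

-- trailing vowel-run count left unflushed by A's middle loop
def pvTrail : List Char → Int → Int
  | [], cnt => cnt
  | c :: m, cnt => if pvAVowel c then pvTrail m (cnt + 1) else pvTrail m 0

-- ALL interior runs: A's flushed runs plus the trailing one
def pvAllRuns : List Char → Int → List Int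
  | [], cnt => if 0 < cnt then [cnt] else []
  | c :: m, cnt =>
    if pvAVowel c then pvAllRuns m (cnt + 1)
    else (if 0 < cnt then cnt :: pvAllRuns m 0 else pvAllRuns m 0)

theorem pvAllRuns_split (m : List Char) (cnt : Int) :
    pvAllRuns m cnt = pvAMid m cnt [] ++ (if 0 < pvTrail m cnt then [pvTrail m cnt] else []) := by
  induction m generalizing cnt with
  | nil => simp [pvAllRuns, pvAMid, pvTrail]
  | cons c m ih =>
    by_cases h : pvAVowel c = true
    · simp only [pvAllRuns, pvAMid, pvTrail, h, if_pos]
      exact ih (cnt + 1)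
    · simp only [pvAllRuns, pvAMid, pvTrail, h, Bool.false_eq_true, if_neg, not_false_iff,
        List.nil_append]
      by_cases hc : (0 : Int) < cnt
      · simp only [if_pos hc]
        rw [ih 0, pvAMid_acc m 0 [cnt]]
        simp
      · simp only [if_neg hc]
        exact ih 0

theorem pvAllRuns_bound (m : List Char) (cnt : Int) (h0 : 0 ≤ cnt) :
    ∀ x ∈ pvAllRuns m cnt, 1 ≤ x ∧ x ≤ cnt + m.length := by
  induction m generalizing cnt with
  | nil =>
    intro x hx
    simp only [pvAllRuns] at hx
    split at hx <;> simp_all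
    omega
  | cons c m ih =>
    intro x hx
    by_cases h : pvAVowel c = true
    · simp only [pvAllRuns, h, if_pos] at hx
      have := ih (cnt + 1) (by omega) x hx
      simp only [List.length_cons]
      push_cast
      push_cast at this
      omega
    · simp only [pvAllRuns, h, Bool.false_eq_true, if_neg, not_false_iff] at hx
      simp only [List.length_cons]
      by_cases hc : (0 : Int) < cnt
      · rw [if_pos hc] at hx
        rcases List.mem_cons.mp hx with rfl | hx'
        · constructor
          · omega
          · push_cast; omega
        · have := ih 0 le_rfl x hx'
          push_cast at this ⊢
          omega
      · rw [if_neg hc] at hx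
        have := ih 0 le_rfl x hx
        push_cast at this ⊢
        omega

-- ===== B-side segment characterizations =====
theorem pvSegs_ne_nil (l : List Char) (cur : Int) : pvSegs l cur ≠ [] := by
  induction l generalizing cur with
  | nil => simp [pvSegs]
  | cons c r ih =>
    by_cases h : pvBVowel c = true <;> simp [pvSegs, h, ih]

theorem pvSegs_vowels (V : List Char) (cur : Int) (h : ∀ c ∈ V, pvAVowel c = true) :
    pvSegs V cur = [cur + V.length] := by
  induction V generalizing cur with
  | nil => simp [pvSegs]
  | cons c V ih =>
    have hc : pvBVowel c = true := by rw [pvB_eq_pvA]; exact h c (by simp)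
    simp only [pvSegs, hc, if_pos]
    rw [ih (cur + 1) (fun x hx => h x (by simp [hx]))]
    simp only [List.length_cons]
    push_cast
    ring_nf

theorem pvSegs_append_cons (X : List Char) (c : Char) (rest : List Char) (cur : Int)
    (hc : pvAVowel c = false) :
    pvSegs (X ++ c :: rest) cur = pvSegs X cur ++ pvSegs rest 0 := by
  induction X generalizing cur with
  | nil =>
    have hc' : pvBVowel c = false := by rw [pvB_eq_pvA]; exact hc
    simp [pvSegs, hc']
  | cons x X ih =>
    by_cases h : pvBVowel x = true
    · simp only [List.cons_append, pvSegs, h, if_pos]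
      exact ih (cur + 1)
    · simp only [List.cons_append, pvSegs, h, Bool.false_eq_true, if_neg, not_false_iff]
      rw [ih 0]

theorem pvSegs_getLastD (m : List Char) (cnt d : Int) :
    (pvSegs m cnt).getLastD d = pvTrail m cnt := by
  induction m generalizing cnt d with
  | nil => simp [pvSegs, pvTrail]
  | cons c m ih =>
    by_cases h : pvAVowel c = true
    · have h' : pvBVowel c = true := by rw [pvB_eq_pvA]; exact h
      simp only [pvSegs, pvTrail, h, h', if_pos]
      exact ih (cnt + 1) d
    · have h' : pvBVowel c = false := by rw [pvB_eq_pvA]; exact pv_not_vowel h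
      simp only [pvSegs, pvTrail, h, h', Bool.false_eq_true, if_neg, not_false_iff,
        List.getLastD_cons]
      exact ih 0 cnt

theorem pvSegs_filter_pos (m : List Char) (cnt : Int) :
    (pvSegs m cnt).filter (fun x => decide (0 < x)) = pvAllRuns m cnt := by
  induction m generalizing cnt with
  | nil =>
    simp only [pvSegs, pvAllRuns, List.filter]
    by_cases hc : (0 : Int) < cnt <;> simp [hc]
  | cons c m ih =>
    by_cases h : pvAVowel c = true
    · have h' : pvBVowel c = true := by rw [pvB_eq_pvA]; exact h
      simp only [pvSegs, pvAllRuns, h, h', if_pos]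
      exact ih (cnt + 1)
    · have h' : pvBVowel c = false := by rw [pvB_eq_pvA]; exact pv_not_vowel h
      simp only [pvSegs, pvAllRuns, h, h', Bool.false_eq_true, if_neg, not_false_iff,
        List.filter_cons]
      by_cases hc : (0 : Int) < cnt <;> simp [hc, ih 0]

theorem pvSegs_dropLast_filter (m : List Char) (cnt : Int) :
    ((pvSegs m cnt).dropLast).filter (fun x => decide (0 < x)) = pvAMid m cnt [] := by
  induction m generalizing cnt with
  | nil => simp [pvSegs, pvAMid]
  | cons c m ih =>
    by_cases h : pvAVowel c = true
    · have h' : pvBVowel c = true := by rw [pvB_eq_pvA]; exact h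
      simp only [pvSegs, pvAMid, h, h', if_pos]
      exact ih (cnt + 1)
    · have h' : pvBVowel c = false := by rw [pvB_eq_pvA]; exact pv_not_vowel h
      simp only [pvSegs, pvAMid, h, h', Bool.false_eq_true, if_neg, not_false_iff]
      rw [List.dropLast_cons_of_ne_nil (pvSegs_ne_nil m 0), List.filter_cons]
      by_cases hc : (0 : Int) < cnt
      · simp only [hc, decide_true, if_pos, List.nil_append]
        rw [ih 0, pvAMid_acc m 0 [cnt]]
        rfl
      · rw [if_neg (by simpa using hc), if_neg hc]
        exact ih 0

-- xs[1:-1] on a list of shape a :: (S ++ [b]) is S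
theorem pv_slice_mid (a b : Int) (S : List Int) :
    PySem.List.slice (a :: (S ++ [b])) (some 1) (some (-1)) = S := by
  have hlen : (a :: (S ++ [b])).length = S.length + 2 := by simp
  simp only [PySem.List.slice, PySem.List.clampIdx, hlen]
  norm_num
  rw [if_neg (by omega : ¬((S.length : Int) + 2 < 1))]
  have h2 : ((S.length : Int) + 2 + -1).toNat - 1 = S.length := by omega
  rw [h2, List.take_left]

-- D_'s splitOnP segments are B's pvSegs
theorem pvDContains_eq (c : Char) : (['a', 'e', 'i', 'o', 'u'].contains c) = pvAVowel c := by
  by_cases h1 : c = 'a' <;> by_cases h2 : c = 'e' <;> by_cases h3 : c = 'i' <;>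
    by_cases h4 : c = 'o' <;> by_cases h5 : c = 'u' <;>
    simp [pvAVowel, h1, h2, h3, h4, h5]

theorem pvSegs_split (l : List Char) (cur : Int) :
    pvSegs l cur =
      match l.splitOnP (fun c => !pvAVowel c) with
      | [] => [cur]
      | h :: t => ((h.length : Int) + cur) :: t.map (fun x => (x.length : Int)) := by
  induction l generalizing cur with
  | nil => simp [pvSegs, List.splitOnP_nil]
  | cons c r ih =>
    rcases hs : r.splitOnP (fun c => !pvAVowel c) with _ | ⟨h, t⟩
    · exact absurd hs (List.splitOnP_ne_nil _ r)
    · by_cases hv : pvAVowel c = true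
      · have hv' : pvBVowel c = true := by rw [pvB_eq_pvA]; exact hv
        simp only [pvSegs, hv', if_pos, List.splitOnP_cons, hv, Bool.not_true,
          Bool.false_eq_true, if_neg, not_false_iff, hs, List.modifyHead_cons]
        rw [ih (cur + 1), hs]
        simp only [List.length_cons]
        push_cast
        ring_nf
      · have hv2 : pvAVowel c = false := pv_not_vowel hv
        have hv' : pvBVowel c = false := by rw [pvB_eq_pvA]; exact hv2
        simp only [pvSegs, hv', Bool.false_eq_true, if_neg, not_false_iff, List.splitOnP_cons,
          hv2, Bool.not_false, if_pos, hs]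
        rw [ih 0, hs]
        simp

theorem pvDSegs_eq (s : String) : pvDSegs s = pvSegs s.toList 0 := by
  unfold pvDSegs
  have hp : (fun c => !(['a', 'e', 'i', 'o', 'u'].contains c)) = (fun c => !pvAVowel c) := by
    funext c
    rw [pvDContains_eq]
  rw [hp, pvSegs_split s.toList 0]
  rcases hs : s.toList.splitOnP (fun c => !pvAVowel c) with _ | ⟨h, t⟩
  · exact absurd hs (List.splitOnP_ne_nil _ _)
  · simp

-- ===== histogram characterization of the descending sort =====
def pvHist (mid : List Int) : Nat → List Int
  | 0 => []
  | N + 1 => List.replicate (mid.count ((N + 1 : Nat) : Int)) ((N + 1 : Nat) : Int) ++ pvHist mid N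

theorem pvHist_nil (N : Nat) : pvHist [] N = [] := by
  induction N with
  | zero => rfl
  | succ N ih => simp [pvHist, ih]

theorem pvHist_mem (mid : List Int) (N : Nat) :
    ∀ x ∈ pvHist mid N, 1 ≤ x ∧ x ≤ (N : Int) := by
  induction N with
  | zero => simp [pvHist]
  | succ N ih =>
    intro x hx
    rcases List.mem_append.mp hx with hx | hx
    · have := (List.eq_of_mem_replicate hx)
      subst this
      constructor <;> [push_cast; push_cast] <;> omega
    · have := ih x hx
      push_cast at this ⊢
      omega

theorem pvHist_count (mid : List Int) (N : Nat) (v : Int) :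
    (pvHist mid N).count v = if 1 ≤ v ∧ v ≤ (N : Int) then mid.count v else 0 := by
  induction N with
  | zero =>
    simp only [pvHist, List.count_nil, Nat.cast_zero]
    rw [if_neg (by omega)]
  | succ N ih =>
    simp only [pvHist, List.count_append, ih, List.count_replicate]
    by_cases hv : v = ((N + 1 : Nat) : Int)
    · subst hv
      rw [if_pos (by simp)]
      rw [if_neg (by push_cast; omega), if_pos (by push_cast; constructor <;> omega)]
      omega
    · rw [if_neg (by simp [beq_iff_eq]; exact fun h => hv h.symm)]
      by_cases hr : 1 ≤ v ∧ v ≤ (N : Int)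
      · rw [if_pos hr, if_pos (by push_cast at hr ⊢; omega)]
        omega
      · rw [if_neg hr, if_neg (by push_cast at hr ⊢; omega)]

theorem pvHist_pairwise (mid : List Int) (N : Nat) :
    (pvHist mid N).Pairwise (fun a b => b ≤ a) := by
  induction N with
  | zero => simp [pvHist]
  | succ N ih =>
    simp only [pvHist]
    rw [List.pairwise_append]
    refine ⟨List.pairwise_replicate.mpr (Or.inr le_rfl), ih, ?_⟩
    intro x hx y hy
    have hx' := List.eq_of_mem_replicate hx
    subst hx'
    have := (pvHist_mem mid N y hy).2
    push_cast at this ⊢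
    omega

-- ===== sorting lemmas =====
theorem pvSortDesc_pairwise (xs : List Int) :
    (PySem.List.sorted xs (fun x => x) true).Pairwise (fun a b => b ≤ a) :=
  PySem.List.sorted_pairwise_rev xs (fun x => x)

theorem pvSortDesc_eq (xs ys : List Int) (hp : ys.Perm xs)
    (hs : ys.Pairwise (fun a b => b ≤ a)) :
    PySem.List.sorted xs (fun x => x) true = ys := by
  haveI : Std.Antisymm (fun a b : Int => b ≤ a) := ⟨fun a b h1 h2 => le_antisymm h2 h1⟩
  exact List.Perm.eq_of_pairwise' (pvSortDesc_pairwise xs) hs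
    ((PySem.List.sorted_perm xs (fun x => x) true).trans hp.symm)

theorem pvSortDesc_eq_hist (mid : List Int) (N : Nat)
    (hb : ∀ x ∈ mid, 1 ≤ x ∧ x ≤ (N : Int)) :
    PySem.List.sorted mid (fun x => x) true = pvHist mid N := by
  refine pvSortDesc_eq mid (pvHist mid N) ?_ (pvHist_pairwise mid N)
  refine List.perm_iff_count.mpr fun v => ?_
  rw [pvHist_count]
  split
  · rfl
  · rename_i hr
    symm
    refine List.count_eq_zero.mpr fun hv => ?_
    exact hr (hb v hv)

-- ===== the greedy histogram sweep is the top-rem sum =====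
theorem pvBLoop_spec (mid : List Int) (N : Nat) (rem total : Int) (h0 : 0 ≤ rem) :
    pvBLoop (PySem.Dict.counter mid) N rem total
      = total + ((pvHist mid N).take rem.toNat).sum := by
  induction N generalizing rem total with
  | zero => simp [pvBLoop, pvHist]
  | succ N ih =>
    simp only [pvBLoop, PySem.Dict.getD_counter, pvHist]
    set v : Int := ((N + 1 : Nat) : Int) with hv
    set mN : Nat := mid.count v with hm
    set c : Int := if rem < (mN : Int) then rem else (mN : Int) with hc
    have hc0 : 0 ≤ rem - c ∧ c = ((min rem.toNat mN : Nat) : Int)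
        ∧ (rem - c).toNat = rem.toNat - mN := by
      rw [hc]
      split <;> constructor <;> [omega; skip; omega; skip] <;> constructor <;> omega
    rw [ih (rem - c) (total + c * v) hc0.1]
    rw [List.take_append, List.sum_append, List.take_replicate, List.sum_replicate,
      List.length_replicate, hc0.2.2]
    have : ((min rem.toNat mN) • v : Int) = c * v := by
      rw [nsmul_eq_mul, ← hc0.2.1]
    rw [this]
    ring

-- the old-vs-new top-(k-1): inserting the trailing run t does not change the top m
-- when at least m runs ≥ t already exist
theorem pv_dropWhile_head_lt (t : Int) :
    ∀ (L : List Int) (h' : Int) (D' : List Int),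
      L.dropWhile (fun x => decide (t ≤ x)) = h' :: D' → h' < t := by
  intro L
  induction L with
  | nil => intro h' D' h; simp at h
  | cons x L ih =>
    intro h' D' h
    by_cases hx : t ≤ x
    · rw [List.dropWhile_cons_of_pos (by simpa using hx)] at h
      exact ih _ _ h
    · rw [List.dropWhile_cons_of_neg (by simpa using hx)] at h
      injection h with h1 h2
      omega

theorem pvTop_insert_small (runs : List Int) (t : Int) (m : Nat)
    (ht : 1 ≤ t)
    (hcnt : m ≤ runs.countP (fun x => decide (t ≤ x))) :
    (PySem.List.sorted (runs ++ [t]) (fun x => x) true).take m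
      = (PySem.List.sorted runs (fun x => x) true).take m := by
  set L := PySem.List.sorted runs (fun x => x) true with hL
  have hpw : L.Pairwise (fun a b => b ≤ a) := pvSortDesc_pairwise runs
  set T := L.takeWhile (fun x => decide (t ≤ x)) with hT
  set Dp := L.dropWhile (fun x => decide (t ≤ x)) with hD
  have hTD : T ++ Dp = L := List.takeWhile_append_dropWhile
  have hperm : (T ++ t :: Dp).Perm (runs ++ [t]) := by
    have h1 : (T ++ t :: Dp).Perm (t :: (T ++ Dp)) := List.perm_middle
    have h2 : (t :: (T ++ Dp)).Perm (t :: runs) := by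
      rw [hTD]
      exact (PySem.List.sorted_perm runs (fun x => x) true).cons t
    exact (h1.trans h2).trans (List.perm_append_singleton t runs).symm
  have hLpw : (T ++ Dp).Pairwise (fun a b => b ≤ a) := by rw [hTD]; exact hpw
  rcases List.pairwise_append.mp hLpw with ⟨hTpw, hDpw, hcross⟩
  have hDlt : ∀ y ∈ Dp, y < t := by
    intro y hy
    rcases hDp : Dp with _ | ⟨h', D'⟩
    · rw [hDp] at hy; simp at hy
    · have hh'lt : h' < t := pv_dropWhile_head_lt t L h' D' (by rw [← hD]; exact hDp)
      rw [hDp] at hy hDpw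
      rcases List.mem_cons.mp hy with rfl | hy'
      · omega
      · rcases List.pairwise_cons.mp hDpw with ⟨hall, _⟩
        have := hall y hy'
        omega
  have hDle : ∀ y ∈ Dp, y ≤ t := fun y hy => le_of_lt (hDlt y hy)
  have hTlen : m ≤ T.length := by
    have hcL : L.countP (fun x => decide (t ≤ x)) = runs.countP (fun x => decide (t ≤ x)) :=
      (PySem.List.sorted_perm runs (fun x => x) true).countP_eq _
    have hsplit : L.countP (fun x => decide (t ≤ x))
        = T.countP (fun x => decide (t ≤ x)) + Dp.countP (fun x => decide (t ≤ x)) := by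
      rw [← hTD, List.countP_append]
    have hcT : T.countP (fun x => decide (t ≤ x)) = T.length :=
      List.countP_eq_length.mpr (fun a ha => by
        have : a ∈ L.takeWhile (fun x => decide (t ≤ x)) := by rw [← hT]; exact ha
        exact List.mem_takeWhile_imp (p := fun x => decide (t ≤ x)) this)
    have hcD : Dp.countP (fun x => decide (t ≤ x)) = 0 :=
      List.countP_eq_zero.mpr (fun a ha => by simpa using not_le.mpr (hDlt a ha))
    omega
  have hpw' : (T ++ t :: Dp).Pairwise (fun a b => b ≤ a) := by
    rw [List.pairwise_append]
    refine ⟨hTpw, ?_, ?_⟩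
    · rw [List.pairwise_cons]
      exact ⟨hDle, hDpw⟩
    · intro x hx y hy
      have hxT : t ≤ x := by
        have := List.mem_takeWhile_imp hx
        simpa using this
      rcases List.mem_cons.mp hy with rfl | hy'
      · exact hxT
      · have := hDle y hy'
        omega
  have heq : PySem.List.sorted (runs ++ [t]) (fun x => x) true = T ++ t :: Dp :=
    pvSortDesc_eq (runs ++ [t]) (T ++ t :: Dp) hperm hpw'
  rw [heq]
  rw [List.take_append_of_le_length hTlen]
  conv_rhs => rw [← hTD]
  rw [List.take_append_of_le_length hTlen]

-- ===== input decomposition =====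
theorem pv_decomp (l : List Char) :
    (∀ x ∈ l, pvAVowel x = true) ∨
      ∃ P c R, l = P ++ c :: R ∧ (∀ x ∈ P, pvAVowel x = true) ∧ pvAVowel c = false := by
  induction l with
  | nil => left; simp
  | cons a l ih =>
    by_cases ha : pvAVowel a = true
    · rcases ih with h | ⟨P, c, R, rfl, hP, hc⟩
      · left
        intro x hx
        rcases List.mem_cons.mp hx with rfl | h'
        · exact ha
        · exact h x h'
      · right
        refine ⟨a :: P, c, R, by simp, ?_, hc⟩
        intro x hx
        rcases List.mem_cons.mp hx with rfl | h'
        · exact ha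
        · exact hP x h'
    · right
      exact ⟨[], a, l, by simp, by simp, by simpa using ha⟩

-- ===== the three cases =====
theorem pv_case_a (str : String) (k : Int) (hall : ∀ x ∈ str.toList, pvAVowel x = true) :
    formLongestStringWithVowelAfterNRemoval str k
      = formLongestStringWithVowelAfterNRemoval_alt str k := by
  have hstart : pvAStart str.toList 0 = str.toList.length := by
    have h := pvAStart_vowels str.toList [] 0 hall
    simpa [pvAStart] using h
  have hsegs : pvSegs str.toList 0 = [(str.toList.length : Int)] := by
    rw [pvSegs_vowels str.toList 0 hall]
    simp
  simp [formLongestStringWithVowelAfterNRemoval, formLongestStringWithVowelAfterNRemoval_alt,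
    hstart, hsegs]

theorem pv_case_b (str : String) (k : Int) (hk : 1 ≤ k)
    (P Q : List Char) (c : Char)
    (hP : ∀ x ∈ P, pvAVowel x = true) (hQ : ∀ x ∈ Q, pvAVowel x = true)
    (hc : pvAVowel c = false)
    (hL : str.toList = P ++ c :: Q) :
    formLongestStringWithVowelAfterNRemoval str k
      = formLongestStringWithVowelAfterNRemoval_alt str k := by
  have hn : str.toList.length = P.length + Q.length + 1 := by rw [hL]; simp; omega
  have hstart : pvAStart str.toList 0 = P.length := by
    rw [hL, pvAStart_vowels P _ 0 hP, Nat.zero_add, pvAStart_consonant _ _ _ hc]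
  have hstart_ne : ¬ (P.length = str.toList.length) := by omega
  have hrev : str.toList.reverse = Q.reverse ++ c :: P.reverse := by rw [hL]; simp
  have he : pvAEnd str.toList.reverse P.length (str.toList.length - 1) = P.length := by
    rw [hrev, pvAEnd_spec Q.reverse c P.reverse P.length _
      (fun x hx => hQ x (List.mem_reverse.mp hx)) hc
      (by rw [List.length_reverse]; omega)]
    rw [List.length_reverse]
    omega
  have hsegs : pvSegs str.toList 0 = (P.length : Int) :: ([] ++ [(Q.length : Int)]) := by
    rw [hL, pvSegs_append_cons P c Q 0 hc, pvSegs_vowels P 0 hP, pvSegs_vowels Q 0 hQ]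
    simp
  simp only [formLongestStringWithVowelAfterNRemoval, formLongestStringWithVowelAfterNRemoval_alt,
    hstart, hstart_ne, if_false, he, hsegs, List.headD_cons]
  rw [Nat.sub_self, pv_slice_mid]
  rw [PySem.List.slice_to _ (by omega : (0 : Int) ≤ k - 1)]
  have hloop : pvBLoop (PySem.Dict.counter []) str.toList.length (k - 1) 0 = 0 := by
    rw [pvBLoop_spec [] _ _ _ (by omega), pvHist_nil]
    simp
  simp only [List.filter_nil, PySem.Dict.foldl_insert_getD_add_one_eq_counter]
  rw [hloop]
  rw [List.take_zero]
  have hs0 : PySem.List.sorted (pvAMid ([] : List Char) 0 []) (fun x => x) true = [] := rfl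
  rw [hs0]
  rw [if_neg (by simp : ¬(((P.length : Int) :: ([] ++ [(Q.length : Int)])).length = 1))]
  simp only [List.take_nil, List.sum_nil, add_zero, List.nil_append, List.getLastD_cons,
    List.getLastD_nil]
  have hn' : (str.toList.length : Int) = (P.length : Int) + (Q.length : Int) + 1 := by omega
  linarith [hn']

theorem pv_case_c_A (str : String) (k : Int) (hk : 1 ≤ k)
    (P M Q : List Char) (c d : Char)
    (hP : ∀ x ∈ P, pvAVowel x = true) (hQ : ∀ x ∈ Q, pvAVowel x = true)
    (hc : pvAVowel c = false) (hd : pvAVowel d = false)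
    (hL : str.toList = P ++ c :: (M ++ d :: Q)) :
    formLongestStringWithVowelAfterNRemoval str k
      = ((P.length : Int) + (Q.length : Int))
        + ((PySem.List.sorted (pvAMid M 0 []) (fun x => x) true).take (k - 1).toNat).sum := by
  have hn : str.toList.length = P.length + M.length + Q.length + 2 := by rw [hL]; simp; omega
  have hstart : pvAStart str.toList 0 = P.length := by
    rw [hL, pvAStart_vowels P _ 0 hP, Nat.zero_add, pvAStart_consonant _ _ _ hc]
  have hstart_ne : ¬ (P.length = str.toList.length) := by omega
  have hrev : str.toList.reverse = Q.reverse ++ d :: (M.reverse ++ c :: P.reverse) := by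
    rw [hL]; simp
  have he : pvAEnd str.toList.reverse P.length (str.toList.length - 1)
      = P.length + 1 + M.length := by
    rw [hrev, pvAEnd_spec Q.reverse d _ P.length _
      (fun x hx => hQ x (List.mem_reverse.mp hx)) hd
      (by rw [List.length_reverse]; omega)]
    rw [List.length_reverse]
    omega
  have hmid : (str.toList.drop P.length).take (P.length + 1 + M.length - P.length) = c :: M := by
    rw [hL, List.drop_left]
    have h1 : P.length + 1 + M.length - P.length = M.length + 1 := by omega
    rw [h1, List.take_succ_cons]
    rw [List.take_left]
  have hruns : pvAMid (c :: M) 0 [] = pvAMid M 0 [] := by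
    simp [pvAMid, hc]
  simp only [formLongestStringWithVowelAfterNRemoval, hstart, hstart_ne, if_false, he, hmid, hruns]
  rw [PySem.List.slice_to _ (by omega : (0 : Int) ≤ k - 1)]
  have hn' : (str.toList.length : Int)
      = (P.length : Int) + (M.length : Int) + (Q.length : Int) + 2 := by omega
  push_cast
  linarith [hn']

theorem pv_case_c_B (str : String) (k : Int) (hk : 1 ≤ k)
    (P M Q : List Char) (c d : Char)
    (hP : ∀ x ∈ P, pvAVowel x = true) (hQ : ∀ x ∈ Q, pvAVowel x = true)
    (hc : pvAVowel c = false) (hd : pvAVowel d = false)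
    (hL : str.toList = P ++ c :: (M ++ d :: Q)) :
    formLongestStringWithVowelAfterNRemoval_alt str k
      = ((P.length : Int) + (Q.length : Int))
        + ((PySem.List.sorted (pvAllRuns M 0) (fun x => x) true).take (k - 1).toNat).sum := by
  have hn : str.toList.length = P.length + M.length + Q.length + 2 := by rw [hL]; simp; omega
  have hSne : pvSegs M 0 ≠ [] := pvSegs_ne_nil M 0
  have hsegs : pvSegs str.toList 0 = (P.length : Int) :: (pvSegs M 0 ++ [(Q.length : Int)]) := by
    rw [hL, pvSegs_append_cons P c _ 0 hc, pvSegs_append_cons M d Q 0 hd,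
      pvSegs_vowels P 0 hP, pvSegs_vowels Q 0 hQ]
    simp
  have hmidB : (PySem.List.slice ((P.length : Int) :: (pvSegs M 0 ++ [(Q.length : Int)]))
      (some 1) (some (-1))).filter (fun x => decide (0 < x)) = pvAllRuns M 0 := by
    rw [pv_slice_mid, pvSegs_filter_pos]
  have hlast : ((P.length : Int) :: (pvSegs M 0 ++ [(Q.length : Int)])).getLastD 0
      = (Q.length : Int) := by
    rw [List.getLastD_cons, List.getLastD_concat]
  have hbound : ∀ x ∈ pvAllRuns M 0, 1 ≤ x ∧ x ≤ (str.toList.length : Int) := by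
    intro x hx
    have := pvAllRuns_bound M 0 le_rfl x hx
    constructor
    · exact this.1
    · have h2 := this.2
      push_cast at h2 ⊢
      omega
  simp only [formLongestStringWithVowelAfterNRemoval_alt, hsegs, hmidB, List.headD_cons, hlast,
    PySem.Dict.foldl_insert_getD_add_one_eq_counter]
  rw [if_neg (by simp : ¬(((P.length : Int) :: (pvSegs M 0 ++ [(Q.length : Int)])).length = 1))]
  rw [pvBLoop_spec (pvAllRuns M 0) str.toList.length (k - 1) 0 (by omega)]
  rw [← pvSortDesc_eq_hist (pvAllRuns M 0) str.toList.length hbound]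
  ring

-- inside a case-c input, the D_ data read off the splitOnP segments translate to
-- the trailing run pvTrail M 0 and A's flushed runs pvAMid M 0 []
theorem pv_D_translate (str : String) (k : Int)
    (P M Q : List Char) (c d : Char)
    (hP : ∀ x ∈ P, pvAVowel x = true) (hQ : ∀ x ∈ Q, pvAVowel x = true)
    (hc : pvAVowel c = false) (hd : pvAVowel d = false)
    (hL : str.toList = P ++ c :: (M ++ d :: Q)) :
    (pvDSegs str).dropLast.getLastD 0 = pvTrail M 0 ∧
    (pvDSegs str).dropLast.dropLast.tail = (pvSegs M 0).dropLast ∧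
    3 ≤ (pvDSegs str).length := by
  have hSne : pvSegs M 0 ≠ [] := pvSegs_ne_nil M 0
  have hsegs : pvSegs str.toList 0 = (P.length : Int) :: (pvSegs M 0 ++ [(Q.length : Int)]) := by
    rw [hL, pvSegs_append_cons P c _ 0 hc, pvSegs_append_cons M d Q 0 hd,
      pvSegs_vowels P 0 hP, pvSegs_vowels Q 0 hQ]
    simp
  have hDB : pvDSegs str = pvSegs str.toList 0 := pvDSegs_eq str
  have hdl : (pvDSegs str).dropLast = (P.length : Int) :: pvSegs M 0 := by
    rw [hDB, hsegs, ← List.cons_append, List.dropLast_concat]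
  refine ⟨?_, ?_, ?_⟩
  · rw [hdl, List.getLastD_cons, pvSegs_getLastD]
  · rw [hdl, List.dropLast_cons_of_ne_nil hSne, List.tail_cons]
  · rw [hDB, hsegs]
    rcases hs : pvSegs M 0 with _ | ⟨s0, S'⟩
    · exact absurd hs hSne
    · simp

-- counting (t ≤ ·) over the flushed runs equals counting over the inner segments
theorem pv_count_translate (M : List Char) (t : Int) (ht : 0 < t) :
    ((pvSegs M 0).dropLast.countP (fun x => decide (t ≤ x)))
      = (pvAMid M 0 []).countP (fun x => decide (t ≤ x)) := by
  have h1 : pvAMid M 0 [] = (pvSegs M 0).dropLast.filter (fun x => decide (0 < x)) := by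
    rw [pvSegs_dropLast_filter]
  rw [h1, List.countP_filter]
  refine (List.countP_congr ?_).symm
  intro x _
  by_cases hx : t ≤ x
  · simp [hx]
    omega
  · simp [hx]

theorem pv_case_c (str : String) (k : Int) (hk : 1 ≤ k)
    (P M Q : List Char) (c d : Char)
    (hP : ∀ x ∈ P, pvAVowel x = true) (hQ : ∀ x ∈ Q, pvAVowel x = true)
    (hc : pvAVowel c = false) (hd : pvAVowel d = false)
    (hL : str.toList = P ++ c :: (M ++ d :: Q))
    (hnd : ¬ D_formLongestStringWithVowelAfterNRemoval str k) :
    formLongestStringWithVowelAfterNRemoval str k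
      = formLongestStringWithVowelAfterNRemoval_alt str k := by
  rw [pv_case_c_A str k hk P M Q c d hP hQ hc hd hL,
    pv_case_c_B str k hk P M Q c d hP hQ hc hd hL]
  congr 1
  rw [pvAllRuns_split M 0]
  by_cases ht : (0 : Int) < pvTrail M 0
  · rw [if_pos ht]
    set t := pvTrail M 0 with htdef
    refine (congrArg List.sum (pvTop_insert_small (pvAMid M 0 []) t (k - 1).toNat (by omega) ?_)).symm
    by_cases hk2 : 2 ≤ k
    · obtain ⟨hT1, hT2, hT3⟩ := pv_D_translate str k P M Q c d hP hQ hc hd hL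
      unfold D_formLongestStringWithVowelAfterNRemoval at hnd
      push_neg at hnd
      have hle := hnd hk2 hT3 (by rw [hT1]; omega)
      rw [hT1, hT2, pv_count_translate M t ht] at hle
      omega
    · have hk1 : k = 1 := by omega
      subst hk1
      simp
  · rw [if_neg ht, List.append_nil]

-- one more element to take, and every remaining element is < t: the take-sum grows by < t
theorem pv_sum_take_lt (Dp : List Int) (t : Int) (j : Nat) (hj : 1 ≤ j) (ht : 1 ≤ t)
    (hall : ∀ y ∈ Dp, y < t) :
    (Dp.take j).sum < t + (Dp.take (j - 1)).sum := by
  have hj' : j = (j - 1) + 1 := by omega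
  rw [hj', List.take_add, List.sum_append]
  simp only [Nat.add_sub_cancel]
  rcases hD : Dp.drop (j - 1) with _ | ⟨y, R⟩
  · simp
    omega
  · have hy : y < t := hall y (List.mem_of_mem_drop (by rw [hD]; exact List.mem_cons_self))
    simp only [List.take_succ_cons, List.take_zero, List.sum_cons, List.sum_nil, add_zero]
    omega

-- inserting the trailing run t strictly INCREASES the top-m sum when fewer than m runs are ≥ t
theorem pvTop_insert_big (runs : List Int) (t : Int) (m : Nat)
    (ht : 1 ≤ t)
    (hcnt : runs.countP (fun x => decide (t ≤ x)) < m) :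
    ((PySem.List.sorted runs (fun x => x) true).take m).sum
      < ((PySem.List.sorted (runs ++ [t]) (fun x => x) true).take m).sum := by
  set L := PySem.List.sorted runs (fun x => x) true with hL
  have hpw : L.Pairwise (fun a b => b ≤ a) := pvSortDesc_pairwise runs
  set T := L.takeWhile (fun x => decide (t ≤ x)) with hT
  set Dp := L.dropWhile (fun x => decide (t ≤ x)) with hD
  have hTD : T ++ Dp = L := List.takeWhile_append_dropWhile
  have hperm : (T ++ t :: Dp).Perm (runs ++ [t]) := by
    have h1 : (T ++ t :: Dp).Perm (t :: (T ++ Dp)) := List.perm_middle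
    have h2 : (t :: (T ++ Dp)).Perm (t :: runs) := by
      rw [hTD]
      exact (PySem.List.sorted_perm runs (fun x => x) true).cons t
    exact (h1.trans h2).trans (List.perm_append_singleton t runs).symm
  have hLpw : (T ++ Dp).Pairwise (fun a b => b ≤ a) := by rw [hTD]; exact hpw
  rcases List.pairwise_append.mp hLpw with ⟨hTpw, hDpw, hcross⟩
  have hDlt : ∀ y ∈ Dp, y < t := by
    intro y hy
    rcases hDp : Dp with _ | ⟨h', D'⟩
    · rw [hDp] at hy; simp at hy
    · have hh'lt : h' < t := pv_dropWhile_head_lt t L h' D' (by rw [← hD]; exact hDp)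
      rw [hDp] at hy hDpw
      rcases List.mem_cons.mp hy with rfl | hy'
      · omega
      · rcases List.pairwise_cons.mp hDpw with ⟨hall, _⟩
        have := hall y hy'
        omega
  have hDle : ∀ y ∈ Dp, y ≤ t := fun y hy => le_of_lt (hDlt y hy)
  have hTlen : T.length < m := by
    have hcL : L.countP (fun x => decide (t ≤ x)) = runs.countP (fun x => decide (t ≤ x)) :=
      (PySem.List.sorted_perm runs (fun x => x) true).countP_eq _
    have hsplit : L.countP (fun x => decide (t ≤ x))
        = T.countP (fun x => decide (t ≤ x)) + Dp.countP (fun x => decide (t ≤ x)) := by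
      rw [← hTD, List.countP_append]
    have hcT : T.countP (fun x => decide (t ≤ x)) = T.length :=
      List.countP_eq_length.mpr (fun a ha => by
        have : a ∈ L.takeWhile (fun x => decide (t ≤ x)) := by rw [← hT]; exact ha
        exact List.mem_takeWhile_imp (p := fun x => decide (t ≤ x)) this)
    have hcD : Dp.countP (fun x => decide (t ≤ x)) = 0 :=
      List.countP_eq_zero.mpr (fun a ha => by simpa using not_le.mpr (hDlt a ha))
    omega
  have hpw' : (T ++ t :: Dp).Pairwise (fun a b => b ≤ a) := by
    rw [List.pairwise_append]
    refine ⟨hTpw, ?_, ?_⟩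
    · rw [List.pairwise_cons]
      exact ⟨hDle, hDpw⟩
    · intro x hx y hy
      have hxT : t ≤ x := by
        have := List.mem_takeWhile_imp hx
        simpa using this
      rcases List.mem_cons.mp hy with rfl | hy'
      · exact hxT
      · have := hDle y hy'
        omega
  have heq : PySem.List.sorted (runs ++ [t]) (fun x => x) true = T ++ t :: Dp :=
    pvSortDesc_eq (runs ++ [t]) (T ++ t :: Dp) hperm hpw'
  rw [heq]
  conv_lhs => rw [← hTD]
  have hTm : T.length ≤ m := by omega
  rw [List.take_append, List.take_append, List.take_of_length_le hTm,
    List.sum_append, List.sum_append]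
  have hjcons : (t :: Dp).take (m - T.length)
      = t :: Dp.take (m - T.length - 1) := by
    have h1 : m - T.length = (m - T.length - 1) + 1 := by omega
    rw [h1, List.take_succ_cons]
    simp only [Nat.add_sub_cancel]
  rw [hjcons, List.sum_cons]
  have := pv_sum_take_lt Dp t (m - T.length) (by omega) ht hDlt
  omega

theorem pv_case_c_tight (str : String) (k : Int) (hk : 1 ≤ k)
    (P M Q : List Char) (c d : Char)
    (hP : ∀ x ∈ P, pvAVowel x = true) (hQ : ∀ x ∈ Q, pvAVowel x = true)
    (hc : pvAVowel c = false) (hd : pvAVowel d = false)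
    (hL : str.toList = P ++ c :: (M ++ d :: Q))
    (hD : D_formLongestStringWithVowelAfterNRemoval str k) :
    formLongestStringWithVowelAfterNRemoval str k
      ≠ formLongestStringWithVowelAfterNRemoval_alt str k := by
  rw [pv_case_c_A str k hk P M Q c d hP hQ hc hd hL,
    pv_case_c_B str k hk P M Q c d hP hQ hc hd hL]
  obtain ⟨hk2, _, hT1', hcnt'⟩ := hD
  obtain ⟨hT1, hT2, _⟩ := pv_D_translate str k P M Q c d hP hQ hc hd hL
  rw [hT1] at hT1'
  rw [hT1, hT2] at hcnt'
  have ht : (0 : Int) < pvTrail M 0 := by omega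
  rw [pv_count_translate M (pvTrail M 0) ht] at hcnt'
  have hlt : ((PySem.List.sorted (pvAMid M 0 []) (fun x => x) true).take (k - 1).toNat).sum
      < ((PySem.List.sorted (pvAllRuns M 0) (fun x => x) true).take (k - 1).toNat).sum := by
    rw [pvAllRuns_split M 0, if_pos ht]
    exact pvTop_insert_big (pvAMid M 0 []) (pvTrail M 0) (k - 1).toNat (by omega) (by omega)
  intro heq
  omega

-- ===== VERDICT (by name: the statement is the Claim_ definition above) =====
theorem formLongestStringWithVowelAfterNRemoval_spec : Claim_unchanged_formLongestStringWithVowelAfterNRemoval := by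
  intro str k _hdom hpre hnd
  have hk : 1 ≤ k := hpre
  rcases pv_decomp str.toList with hall | ⟨P, c, R, hL, hP, hc⟩
  · exact pv_case_a str k hall
  · rcases pv_decomp R.reverse with hallR | ⟨Q', dd, M'', hR, hQ', hdd⟩
    · exact pv_case_b str k hk P R c hP
        (fun x hx => hallR x (List.mem_reverse.mpr hx)) hc hL
    · have hRdec : R = M''.reverse ++ dd :: Q'.reverse := by
        have : R = R.reverse.reverse := by simp
        rw [this, hR]
        simp
      refine pv_case_c str k hk P M''.reverse Q'.reverse c dd hP
        (fun x hx => hQ' x (by simpa using (List.mem_reverse.mp hx))) hc hdd ?_ hnd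
      rw [hL, hRdec]

theorem formLongestStringWithVowelAfterNRemoval_changed : Claim_changed_formLongestStringWithVowelAfterNRemoval := by
  unfold Claim_changed_formLongestStringWithVowelAfterNRemoval; decide

theorem formLongestStringWithVowelAfterNRemoval_tight : Claim_exact_formLongestStringWithVowelAfterNRemoval := by
  intro str k _hdom hpre hD
  have hk : 1 ≤ k := hpre
  rcases pv_decomp str.toList with hall | ⟨P, c, R, hL, hP, hc⟩
  · exfalso
    have hsegs : pvDSegs str = [(str.toList.length : Int)] := by
      rw [pvDSegs_eq, pvSegs_vowels str.toList 0 hall]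
      simp
    have h3 := hD.2.1
    rw [hsegs] at h3
    simp at h3
  · rcases pv_decomp R.reverse with hallR | ⟨Q', dd, M'', hR, hQ', hdd⟩
    · exfalso
      have hQ : ∀ x ∈ R, pvAVowel x = true := fun x hx => hallR x (List.mem_reverse.mpr hx)
      have hsegs : pvDSegs str = (P.length : Int) :: ([] ++ [(R.length : Int)]) := by
        rw [pvDSegs_eq, hL, pvSegs_append_cons P c R 0 hc, pvSegs_vowels P 0 hP,
          pvSegs_vowels R 0 hQ]
        simp
      have h3 := hD.2.1
      rw [hsegs] at h3
      simp at h3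
    · have hRdec : R = M''.reverse ++ dd :: Q'.reverse := by
        have : R = R.reverse.reverse := by simp
        rw [this, hR]
        simp
      refine pv_case_c_tight str k hk P M''.reverse Q'.reverse c dd hP
        (fun x hx => hQ' x (by simpa using (List.mem_reverse.mp hx))) hc hdd ?_ hD
      rw [hL, hRdec]
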